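-- pv_equiv track=rewrite | github.com/martinezmario10/technical_Test_Repository | SourceAr/functions/challenge_1_storytwo.py | data_comparison
-- ===== SOURCE A (Python) =====
-- def data_comparison(lista):
--     count = 0
--     value_pp_attack = ""
--     for fact in lista:
--         if count > 0:
--             if (lista[count - 1]) == "pp":
--                 value_pp_attack = str(fact)
--
--         count += 1
--
--     return value_pp_attack
-- ===== SOURCE B (Python) =====
-- def data_comparison(lista):
--     for prev, nxt in reversed(list(zip(lista, lista[1:]))):
--         if prev == "pp":
--             return str(nxt)
--     return ""
-- ===== Notes on version B (the rewrite author's own statement) =====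
-- stated objective: simpler
-- what changed: Replaces A's forward index-counting loop that keeps overwriting an accumulator with a reverse scan over adjacent pairs that returns at the first (i.e. last-in-order) successor of "pp".
import Mathlib
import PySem

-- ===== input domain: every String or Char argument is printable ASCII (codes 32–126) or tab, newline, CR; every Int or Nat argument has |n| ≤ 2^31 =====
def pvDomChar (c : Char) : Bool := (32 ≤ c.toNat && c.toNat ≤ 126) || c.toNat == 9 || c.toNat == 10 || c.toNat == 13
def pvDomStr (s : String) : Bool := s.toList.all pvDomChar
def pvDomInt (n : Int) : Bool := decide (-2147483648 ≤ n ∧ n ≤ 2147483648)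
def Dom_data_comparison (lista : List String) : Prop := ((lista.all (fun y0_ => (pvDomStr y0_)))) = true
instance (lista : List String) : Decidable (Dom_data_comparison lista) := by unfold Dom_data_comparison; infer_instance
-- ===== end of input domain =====

-- B replaces A's forward index-counting accumulator loop by a reverse scan over
-- adjacent pairs with an early return (objective: simpler).

-- ===== PORT A =====
def data_comparison (lista : List String) : String :=
  (lista.foldl
    (fun (s : Int × String) fact =>
      (s.1 + 1,
       if s.1 > 0 then
         if PySem.List.pyGet? lista (s.1 - 1) = some "pp" then fact else s.2
       else s.2))
    ((0 : Int), "")).2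

-- ===== PORT B =====
-- the 'for … return … / return ""' loop over reversed(list(zip(lista, lista[1:])))
def dcAltLoop : List (String × String) → String
  | [] => ""
  | (p, n) :: rest => if p = "pp" then n else dcAltLoop rest

def data_comparison_alt (lista : List String) : String :=
  dcAltLoop ((lista.zip (PySem.List.slice lista (some 1) none)).reverse)

-- ===== PRECONDITION & SPEC =====
def Spec_data_comparison (lista : List String) (out : String) : Prop := out = data_comparison_alt lista
instance (lista : List String) (out : String) : Decidable (Spec_data_comparison lista out) := by unfold Spec_data_comparison; infer_instance

-- ===== CLAIM (what is proved, stated in full; the proofs are below) =====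
def Claim_equal_data_comparison : Prop := ∀ (lista : List String), Dom_data_comparison lista → Spec_data_comparison lista (data_comparison lista)

-- ===== LEMMAS AND PROOFS =====

-- the common middle form: a forward fold over adjacent pairs that overwrites on "pp"
def dcStep (acc : String) (pr : String × String) : String :=
  if pr.1 = "pp" then pr.2 else acc

-- B's early-return reverse scan = forward overwrite fold over the pairs
theorem dcAltLoop_reverse (xs : List (String × String)) :
    dcAltLoop xs.reverse = xs.foldl dcStep "" := by
  induction xs using List.reverseRecOn with
  | nil => rfl
  | append_singleton xs p ih =>
      cases p with
      | mk a b => simp [dcAltLoop, dcStep, ih]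

-- A's indexed fold over the suffix, with count = (pre ++ [x]).length, equals the
-- pair fold over (x :: suf).zip suf
theorem dcA_aux (suf : List String) : ∀ (pre : List String) (x acc : String),
    (List.foldl
      (fun (s : Int × String) fact =>
        (s.1 + 1,
         if s.1 > 0 then
           if PySem.List.pyGet? (pre ++ x :: suf) (s.1 - 1) = some "pp" then fact else s.2
         else s.2))
      (((pre ++ [x]).length : Int), acc) suf).2
    = List.foldl dcStep acc ((x :: suf).zip suf) := by
  induction suf with
  | nil => intro pre x acc; rfl
  | cons y rest ih =>
      intro pre x acc
      have hidx : (((pre ++ [x]).length : Int)) - 1 = (pre.length : Int) := by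
        simp
      have hget : PySem.List.pyGet? (pre ++ x :: y :: rest) (((pre ++ [x]).length : Int) - 1)
          = some x := by
        rw [hidx]; exact PySem.List.pyGet?_append_length pre (y :: rest) x
      have hpos : ((pre ++ [x]).length : Int) > 0 := by
        simp
      have hassoc : pre ++ x :: y :: rest = (pre ++ [x]) ++ y :: rest := by simp
      have hcast : ((pre ++ [x]).length : Int) + 1 = (((pre ++ [x]) ++ [y]).length : Int) := by
        simp
        omega
      simp only [List.foldl_cons, if_pos hpos, hget, Option.some.injEq]
      rw [hassoc, hcast, ih (pre ++ [x]) y (if x = "pp" then y else acc)]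
      simp [dcStep]

-- A = the pair fold
theorem dcA_eq_pairs (lista : List String) :
    data_comparison lista = (lista.zip lista.tail).foldl dcStep "" := by
  cases lista with
  | nil => rfl
  | cons x rest =>
      unfold data_comparison
      simp only [List.foldl_cons]
      have h0 : ¬ ((0 : Int) > 0) := by omega
      rw [if_neg h0]
      have := dcA_aux rest [] x ""
      simpa using this

-- ===== VERDICT (by name: the statement is the Claim_ definition above) =====
theorem data_comparison_spec : Claim_equal_data_comparison := by
  intro lista _
  unfold Spec_data_comparison data_comparison_alt
  rw [PySem.List.slice_from_one, dcAltLoop_reverse, dcA_eq_pairs]
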